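-- pv_equiv track=rewrite | github.com/opsmill/infrahub | python_sdk/infrahub_client/utils.py | base36encode
-- ===== SOURCE A (Python) =====
-- def base36encode(number: int) -> str:
--     if not isinstance(number, (int)):
--         raise TypeError("number must be an integer")
--     is_negative = number < 0
--     number = abs(number)
--
--     alphabet = "0123456789ABCDEFGHIJKLMNOPQRSTUVWXYZ"
--     base36 = ""
--
--     while number:
--         number, i = divmod(number, 36)
--         base36 = alphabet[i] + base36
--     if is_negative:
--         base36 = "-" + base36
--
--     return base36 or alphabet[0]
-- ===== SOURCE B (Python) =====
-- _ALPHABET = "0123456789ABCDEFGHIJKLMNOPQRSTUVWXYZ"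
--
--
-- def base36encode(number: int) -> str:
--     if not isinstance(number, (int)):
--         raise TypeError("number must be an integer")
--     sign = "-" if number < 0 else ""
--     n = abs(number)
--     # find the largest power of 36 not exceeding n (at least 1)
--     p = 1
--     while 36 * p <= n:
--         p = 36 * p
--     # emit digits most-significant first by dividing by descending powers
--     out = []
--     while p >= 1:
--         out.append(_ALPHABET[n // p])
--         n %= p
--         p //= 36
--     return sign + "".join(out)
-- ===== Notes on version B (the rewrite author's own statement) =====
-- stated objective: alternative
-- what changed: Replaces A's least-significant-first divmod/prepend loop with a most-significant-first algorithm: first find the largest power of 36 not exceeding |n|, then extract digits left-to-right by dividing by descending powers.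
import Mathlib
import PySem

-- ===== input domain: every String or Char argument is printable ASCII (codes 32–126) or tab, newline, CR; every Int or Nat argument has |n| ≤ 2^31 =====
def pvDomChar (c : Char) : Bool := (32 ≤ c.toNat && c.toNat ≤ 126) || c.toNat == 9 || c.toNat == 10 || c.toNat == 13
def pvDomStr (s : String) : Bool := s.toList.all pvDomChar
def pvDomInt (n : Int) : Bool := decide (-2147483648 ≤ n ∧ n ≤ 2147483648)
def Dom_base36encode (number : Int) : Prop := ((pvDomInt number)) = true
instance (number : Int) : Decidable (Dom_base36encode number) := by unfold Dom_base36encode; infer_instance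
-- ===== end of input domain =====

-- B replaces A's least-significant-first divmod/prepend loop with most-significant-first digit extraction over descending powers of 36 (same behaviour, different algorithm).


-- ===== PORT A =====
-- the alphabet literal both Pythons spell out
def pvAlphabet : List Char := "0123456789ABCDEFGHIJKLMNOPQRSTUVWXYZ".toList

-- A's while loop: number, i = divmod(number, 36); base36 = alphabet[i] + base36.
-- The loop runs on abs(number) ≥ 0, so divmod is Nat div/mod here (exact); the
-- index i = n % 36 < 36 is always in range, so getD's default is never used.
def base36loopA : Nat → List Char → List Char
  | 0, acc => acc
  | n+1, acc => base36loopA ((n+1)/36) (pvAlphabet.getD ((n+1)%36) '0' :: acc)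
decreasing_by exact Nat.div_lt_self (Nat.succ_pos n) (by omega)

def base36encode (number : Int) : String :=
  let isNegative := number < 0
  let n := number.natAbs
  let base36 := base36loopA n []
  let base36 := if isNegative then '-' :: base36 else base36
  String.ofList (if base36 = [] then [pvAlphabet.getD 0 '0'] else base36)

-- ===== PORT B =====
-- B's first loop: p = 1; while 36 * p <= n: p = 36 * p  (largest power of 36 ≤ n, at least 1)
def base36findPow (n p : Nat) (hp : 0 < p) : Nat :=
  if h : 36 * p ≤ n then base36findPow n (36 * p) (by omega) else p
termination_by n + 1 - p
decreasing_by omega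

-- B's second loop: while p >= 1: out.append(ALPHABET[n // p]); n %= p; p //= 36.
-- The index n // p is always < 36 at every call B makes (n < 36*p invariant), so
-- getD's default is never used; getD is the exact port of the in-range indexing.
def base36digits (n p : Nat) : List Char :=
  if h : 1 ≤ p then pvAlphabet.getD (n / p) '0' :: base36digits (n % p) (p / 36) else []
termination_by p
decreasing_by exact Nat.div_lt_self h (by omega)

def base36encode_alt (number : Int) : String :=
  let sign : List Char := if number < 0 then ['-'] else []
  let n := number.natAbs
  let p := base36findPow n 1 (by omega)
  String.ofList (sign ++ base36digits n p)

-- ===== PRECONDITION & SPEC =====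
def Spec_base36encode (number : Int) (out : String) : Prop := out = base36encode_alt number
instance (number : Int) (out : String) : Decidable (Spec_base36encode number out) := by unfold Spec_base36encode; infer_instance

-- ===== CLAIM (what is proved, stated in full; the proofs are below) =====
def Claim_equal_base36encode : Prop := ∀ (number : Int), Dom_base36encode number → Spec_base36encode number (base36encode number)

-- ===== LEMMAS AND PROOFS =====
-- proof-side helper: the canonical (no-leading-zero) base-36 digit list of n
def b36rep : Nat → List Char
  | 0 => []
  | n+1 => b36rep ((n+1)/36) ++ [pvAlphabet.getD ((n+1)%36) '0']
decreasing_by exact Nat.div_lt_self (Nat.succ_pos n) (by omega)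

theorem base36loopA_eq_rep (n : Nat) : ∀ acc, base36loopA n acc = b36rep n ++ acc := by
  induction n using Nat.strong_induction_on with
  | _ n ih =>
    intro acc
    match n with
    | 0 => rw [base36loopA, b36rep]; rfl
    | m+1 =>
      rw [base36loopA, b36rep,
        ih ((m+1)/36) (Nat.div_lt_self (Nat.succ_pos m) (by omega)), List.append_assoc]
      rfl

theorem b36rep_ne_nil (n : Nat) (h : n ≠ 0) : b36rep n ≠ [] := by
  match n with
  | 0 => exact absurd rfl h
  | m+1 => rw [b36rep]; simp

theorem b36rep_len_le (m : Nat) : ∀ n, n < 36 ^ m → (b36rep n).length ≤ m := by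
  induction m with
  | zero => intro n h; interval_cases n; rw [b36rep]; simp
  | succ m ih =>
    intro n h
    match n with
    | 0 => rw [b36rep]; simp
    | k+1 =>
      rw [b36rep]
      have := ih ((k+1)/36) (by
        rw [Nat.div_lt_iff_lt_mul (by norm_num)]
        calc k+1 < 36 ^ (m+1) := h
          _ = 36 ^ m * 36 := by ring)
      simpa using this

theorem b36rep_len_ge (m : Nat) : ∀ n, 36 ^ m ≤ n → m + 1 ≤ (b36rep n).length := by
  induction m with
  | zero =>
    intro n h
    match n with
    | k+1 => rw [b36rep]; simp
  | succ m ih =>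
    intro n h
    have hn : 1 ≤ n := le_trans (Nat.one_le_pow _ _ (by norm_num)) h
    match n, hn with
    | k+1, _ =>
      rw [b36rep]
      have : 36 ^ m ≤ (k+1)/36 := by
        rw [Nat.le_div_iff_mul_le (by norm_num)]
        calc 36 ^ m * 36 = 36 ^ (m+1) := by ring
          _ ≤ k+1 := h
      have := ih _ this
      simp only [List.length_append, List.length_singleton]
      omega

-- fixed-width (m+1 digits) most-significant-first representation
def b36fix : Nat → Nat → List Char
  | 0, n => [pvAlphabet.getD n '0']
  | m+1, n => pvAlphabet.getD (n / 36 ^ (m+1)) '0' :: b36fix m (n % 36 ^ (m+1))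

theorem base36digits_pow (m : Nat) : ∀ n, base36digits n (36 ^ m) = b36fix m n := by
  induction m with
  | zero =>
    intro n
    rw [base36digits, b36fix]
    simp [base36digits]
  | succ m ih =>
    intro n
    have h1 : 36 ^ (m+1) / 36 = 36 ^ m := by
      rw [pow_succ, Nat.mul_div_cancel _ (by norm_num)]
    rw [base36digits, dif_pos (Nat.one_le_iff_ne_zero.mpr (by positivity)), h1, ih]
    rfl

-- b36fix also satisfies the least-significant-digit recursion
theorem b36fix_succ (m : Nat) : ∀ n, b36fix (m+1) n = b36fix m (n / 36) ++ [pvAlphabet.getD (n % 36) '0'] := by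
  induction m with
  | zero => intro n; simp only [b36fix]; norm_num
  | succ m ih =>
    intro n
    rw [b36fix, ih (n % 36 ^ (m+1+1)), b36fix]
    have e1 : n / 36 / 36 ^ (m+1) = n / 36 ^ (m+1+1) := by
      rw [Nat.div_div_eq_div_mul, ← pow_succ']
    have e2 : n % 36 ^ (m+1+1) / 36 = n / 36 % 36 ^ (m+1) := by
      rw [pow_succ', Nat.mod_mul_right_div_self]
    have e3 : n % 36 ^ (m+1+1) % 36 = n % 36 := by
      rw [pow_succ', Nat.mod_mul_right_mod]
    rw [e1, e2, e3]
    rfl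

theorem b36fix_eq_rep (m : Nat) : ∀ n, n < 36 ^ (m+1) →
    b36fix m n = List.replicate (m + 1 - (b36rep n).length) '0' ++ b36rep n := by
  induction m with
  | zero =>
    intro n h
    match n with
    | 0 => rw [b36fix, b36rep]; rfl
    | k+1 =>
      rw [b36fix, b36rep]
      have h36 : k+1 < 36 := by simpa using h
      have h0 : (k+1)/36 = 0 := Nat.div_eq_of_lt h36
      have hm : (k+1)%36 = k+1 := Nat.mod_eq_of_lt h36
      rw [h0, hm, b36rep]
      simp
  | succ m ih =>
    intro n h
    rw [b36fix_succ]
    have hdiv : n / 36 < 36 ^ (m+1) := by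
      rw [Nat.div_lt_iff_lt_mul (by norm_num)]
      calc n < 36 ^ (m+1+1) := h
        _ = 36 ^ (m+1) * 36 := by ring
    rw [ih _ hdiv]
    match n with
    | 0 =>
      rw [b36rep]
      simp [List.replicate_succ']
      decide
    | k+1 =>
      have hlen : (b36rep ((k+1)/36)).length ≤ m + 1 := b36rep_len_le _ _ hdiv
      conv_rhs => rw [b36rep]
      have : m + 1 + 1 - (b36rep ((k+1)/36) ++ [pvAlphabet.getD ((k+1)%36) '0']).length
           = m + 1 - (b36rep ((k+1)/36)).length := by
        simp only [List.length_append, List.length_singleton]; omega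
      rw [this, List.append_assoc]

theorem base36findPow_spec (n p : Nat) (hp : 0 < p) :
    ∃ j, base36findPow n p hp = p * 36 ^ j ∧ n < 36 * (p * 36 ^ j) ∧ (j = 0 ∨ p * 36 ^ j ≤ n) := by
  fun_induction base36findPow with
  | case1 p hp h ih =>
    obtain ⟨j, h1, h2, h3⟩ := ih
    refine ⟨j + 1, ?_, ?_, Or.inr ?_⟩
    · rw [h1]; ring
    · calc n < 36 * (36 * p * 36 ^ j) := h2
        _ = 36 * (p * 36 ^ (j+1)) := by ring
    · rcases h3 with h3 | h3
      · subst h3; simpa [mul_comm] using h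
      · calc p * 36 ^ (j+1) = 36 * p * 36 ^ j := by ring
          _ ≤ n := h3
  | case2 p hp h =>
    exact ⟨0, by simp, by simpa [mul_comm] using Nat.lt_of_not_le h, Or.inl rfl⟩

-- ===== VERDICT (by name: the statement is the Claim_ definition above) =====
theorem base36encode_spec : Claim_equal_base36encode := by
  intro number _
  unfold Spec_base36encode base36encode base36encode_alt
  simp only [base36loopA_eq_rep, List.append_nil]
  obtain ⟨j, h1, h2, h3⟩ := base36findPow_spec number.natAbs 1 (by omega)
  simp only [one_mul] at h1 h2 h3
  rw [h1, base36digits_pow, b36fix_eq_rep j _ (by calc number.natAbs < 36 * 36 ^ j := h2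
    _ = 36 ^ (j+1) := by ring)]
  by_cases hz : number = 0
  · subst hz
    have hj : j = 0 := by
      rcases h3 with h3 | h3
      · exact h3
      · simp at h3
    subst hj
    simp [b36rep]
    decide
  · have hn : 1 ≤ number.natAbs := by omega
    have hle : 36 ^ j ≤ number.natAbs := by
      rcases h3 with h3 | h3
      · subst h3; simpa using hn
      · exact h3
    have hlen : (b36rep number.natAbs).length = j + 1 :=
      le_antisymm (b36rep_len_le (j+1) _ (by calc number.natAbs < 36 * 36 ^ j := h2
        _ = 36 ^ (j+1) := by ring)) (b36rep_len_ge j _ hle)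
    have hne : b36rep number.natAbs ≠ [] := b36rep_ne_nil _ (by omega)
    rw [hlen]
    simp only [Nat.sub_self, List.replicate_zero, List.nil_append]
    by_cases hneg : number < 0
    · simp [hneg]
    · simp [hneg, hne]
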